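-- pv_equiv track=rewrite | github.com/rmenon1008/labdb | src/labdb/cli_commands.py | _find_common_notes
-- ===== SOURCE A (Python) =====
-- def _find_common_notes(notes_list):
--     """Find notes that are common across all experiments with the same values."""
--     if not notes_list:
--         return {}
--
--     # Start with the first experiment's notes
--     common_notes = notes_list[0].copy()
--
--     # For each subsequent experiment, keep only keys that exist with the same value
--     for notes in notes_list[1:]:
--         keys_to_remove = []
--         for key, value in common_notes.items():
--             if key not in notes or notes[key] != value:
--                 keys_to_remove.append(key)
--
--         for key in keys_to_remove:
--             del common_notes[key]
--
--     return common_notes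
-- ===== SOURCE B (Python) =====
-- def _find_common_notes(notes_list):
--     """Find notes that are common across all experiments with the same values."""
--     if not notes_list:
--         return {}
--     first, rest = notes_list[0], notes_list[1:]
--     return {k: v for k, v in first.items()
--             if all(k in n and n[k] == v for n in rest)}
-- ===== Notes on version B (the rewrite author's own statement) =====
-- stated objective: simpler
-- what changed: B replaces A's per-dict incremental deletion from a mutable copy (build keys_to_remove, then delete) with a single comprehension over the first dict's items that tests each candidate pair against every later dict with short-circuit; nothing is ever mutated or deleted.
import Mathlib
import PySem

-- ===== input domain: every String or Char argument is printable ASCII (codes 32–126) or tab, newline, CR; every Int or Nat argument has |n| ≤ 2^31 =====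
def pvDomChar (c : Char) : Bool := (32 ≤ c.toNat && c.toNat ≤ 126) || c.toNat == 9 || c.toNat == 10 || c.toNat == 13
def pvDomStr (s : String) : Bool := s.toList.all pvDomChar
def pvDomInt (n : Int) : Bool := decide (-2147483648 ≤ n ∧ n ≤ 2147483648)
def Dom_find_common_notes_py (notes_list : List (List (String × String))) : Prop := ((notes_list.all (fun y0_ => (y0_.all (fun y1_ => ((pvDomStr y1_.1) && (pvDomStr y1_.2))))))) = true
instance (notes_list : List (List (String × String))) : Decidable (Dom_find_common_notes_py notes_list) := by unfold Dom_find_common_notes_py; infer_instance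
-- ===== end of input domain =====

-- B builds the result in one comprehension over the first dict's items, testing each pair
-- against every later dict with short-circuit, instead of A's incremental deletion from a mutable copy.

-- ===== PORT A =====
-- one iteration of A's outer loop: build keys_to_remove, then delete each key from common_notes
def pvStepA (common : List (String × String)) (notes : List (String × String)) :
    List (String × String) :=
  (common.foldl (fun acc kv =>
      if (match notes.lookup kv.1 with
          | none => true
          | some w => w != kv.2) then acc ++ [kv.1] else acc) []).foldl
    (fun c k => c.eraseP (fun kv => kv.1 == k)) common

def find_common_notes_py (notes_list : List (List (String × String))) : List (String × String) :=
  match notes_list with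
  | [] => []
  | first :: rest => rest.foldl pvStepA first

-- ===== PORT B =====
def find_common_notes_py_alt (notes_list : List (List (String × String))) : List (String × String) :=
  match notes_list with
  | [] => []
  | first :: rest =>
      first.filter (fun kv => rest.all (fun n => n.lookup kv.1 == some kv.2))

-- ===== PRECONDITION & SPEC =====
-- Pre_ excludes inner lists with duplicate keys: those do not encode any Python dict
-- (dict[str,str] always has distinct keys), so A's behaviour there is meaningless.
def Pre_find_common_notes_py (notes_list : List (List (String × String))) : Prop :=
  (notes_list.all (fun n => (n.map (·.1)).Nodup)) = true
instance (notes_list : List (List (String × String))) : Decidable (Pre_find_common_notes_py notes_list) := by unfold Pre_find_common_notes_py; infer_instance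

def pvWitness_find_common_notes_py : (List (List (String × String))) :=
  [[("a", "1"), ("b", "2")], [("b", "2"), ("c", "3")]]

def Spec_find_common_notes_py (notes_list : List (List (String × String))) (out : List (String × String)) : Prop := out = find_common_notes_py_alt notes_list
instance (notes_list : List (List (String × String))) (out : List (String × String)) : Decidable (Spec_find_common_notes_py notes_list out) := by unfold Spec_find_common_notes_py; infer_instance

-- ===== CLAIM (what is proved, stated in full; the proofs are below) =====
def Claim_equal_find_common_notes_py : Prop := ∀ (notes_list : List (List (String × String))), Dom_find_common_notes_py notes_list → Pre_find_common_notes_py notes_list → Spec_find_common_notes_py notes_list (find_common_notes_py notes_list)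

-- ===== LEMMAS AND PROOFS =====

theorem pv_nodup_filter (c : List (String × String)) (p : String × String → Bool)
    (h : (c.map (·.1)).Nodup) : ((c.filter p).map (·.1)).Nodup :=
  List.Nodup.sublist (List.Sublist.map _ List.filter_sublist) h

-- 'for key, value in items: if cond: out.append(key)' as filter+map
theorem pv_foldl_append_if (common : List (String × String)) (init : List String)
    (C : String × String → Bool) :
    common.foldl (fun acc kv => if C kv then acc ++ [kv.1] else acc) init
      = init ++ (common.filter C).map (·.1) := by
  induction common generalizing init with
  | nil => simp
  | cons hd tl ih =>
      simp only [List.foldl_cons, List.filter_cons]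
      by_cases hc : C hd <;> simp [hc, ih]

-- on a nodup-keys association list, deleting a key's first occurrence deletes every occurrence
theorem pv_eraseP_eq_filter (c : List (String × String)) (k : String)
    (h : (c.map (·.1)).Nodup) :
    c.eraseP (fun kv => kv.1 == k) = c.filter (fun kv => kv.1 != k) := by
  induction c with
  | nil => rfl
  | cons hd tl ih =>
      simp only [List.map_cons, List.nodup_cons] at h
      by_cases hk : hd.1 = k
      · subst hk
        simp only [List.eraseP_cons, List.filter_cons, bne_self_eq_false, beq_self_eq_true,
          cond_true, Bool.false_eq_true, if_false]
        have : ∀ kv ∈ tl, (kv.1 != hd.1) = true := by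
          intro kv hmem
          have : kv.1 ≠ hd.1 := fun e => h.1 (e ▸ List.mem_map_of_mem hmem)
          simpa [bne] using this
        exact (List.filter_eq_self.mpr this).symm
      · simp only [List.eraseP_cons, List.filter_cons]
        have hb : (hd.1 == k) = false := by simpa using hk
        simp [hb, bne, ih h.2]

theorem pv_foldl_eraseP_eq_filter (ks : List String) (c : List (String × String))
    (h : (c.map (·.1)).Nodup) :
    ks.foldl (fun c k => c.eraseP (fun kv => kv.1 == k)) c
      = c.filter (fun kv => !(ks.contains kv.1)) := by
  induction ks generalizing c with
  | nil => simp
  | cons k ks ih =>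
      simp only [List.foldl_cons]
      rw [pv_eraseP_eq_filter c k h, ih]
      · rw [List.filter_filter]
        apply List.filter_congr
        intro kv _
        rcases eq_or_ne kv.1 k with he | he
        · simp [he]
        · simp [he, bne]
      · exact pv_nodup_filter _ _ h

-- one iteration of A's loop, on a nodup-keys common list, keeps exactly the matching pairs
theorem pv_stepA_eq (common notes : List (String × String))
    (h : (common.map (·.1)).Nodup) :
    pvStepA common notes = common.filter (fun kv => notes.lookup kv.1 == some kv.2) := by
  unfold pvStepA
  rw [pv_foldl_append_if (C := fun kv => (match notes.lookup kv.1 with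
                         | none => true
                         | some w => w != kv.2))]
  simp only [List.nil_append]
  rw [pv_foldl_eraseP_eq_filter _ _ h]
  apply List.filter_congr
  intro kv hmem
  have hmemk : kv.1 ∈ common.map (·.1) := List.mem_map_of_mem hmem
  -- kv.1 is in the removal key list iff kv itself fails the test (keys are distinct)
  have : ((common.filter (fun kv => (match notes.lookup kv.1 with
                         | none => true
                         | some w => w != kv.2))).map (·.1)).contains kv.1
      = (match notes.lookup kv.1 with
         | none => true
         | some w => w != kv.2) := by
    by_cases hc : (match notes.lookup kv.1 with
                   | none => true
                   | some w => w != kv.2) = true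
    · simp only [hc]
      have : kv ∈ common.filter (fun kv => (match notes.lookup kv.1 with
                   | none => true
                   | some w => w != kv.2)) := List.mem_filter.mpr ⟨hmem, hc⟩
      simpa using List.mem_map_of_mem (f := (·.1)) this
    · simp only [Bool.not_eq_true] at hc
      simp only [hc]
      rw [List.contains_eq_any_beq]
      simp only [List.any_map, List.any_filter, List.any_eq_false]
      intro kv' hmem'
      by_cases he : kv'.1 = kv.1
      · -- same key, distinct keys ⇒ same pair ⇒ test is false
        have : kv' = kv := by
          rcases kv with ⟨k1, v1⟩; rcases kv' with ⟨k1', v1'⟩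
          simp only at he; subst he
          have := List.inj_on_of_nodup_map h hmem' hmem rfl
          simpa using this
        subst this; simp [hc]
      · intro hand
        have hk : kv.1 = kv'.1 := by
          simpa using (Bool.and_eq_true_iff.mp hand).2
        exact he hk.symm
  rw [this]
  cases hl : notes.lookup kv.1 with
  | none => simp
  | some w => by_cases hw : w = kv.2 <;> simp [hw, bne]

theorem pv_main (rest : List (List (String × String))) (common : List (String × String))
    (h : (common.map (·.1)).Nodup) :
    rest.foldl pvStepA common
      = common.filter (fun kv => rest.all (fun n => n.lookup kv.1 == some kv.2)) := by
  induction rest generalizing common with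
  | nil => simp
  | cons n rest ih =>
      simp only [List.foldl_cons]
      rw [pv_stepA_eq common n h, ih]
      · rw [List.filter_filter]
        apply List.filter_congr
        intro kv _
        simp [Bool.and_comm]
      · exact pv_nodup_filter _ _ h

-- ===== VERDICT (by name: the statement is the Claim_ definition above) =====
theorem find_common_notes_py_spec : Claim_equal_find_common_notes_py := by
  intro notes_list _ hpre
  unfold Spec_find_common_notes_py
  cases notes_list with
  | nil => rfl
  | cons first rest =>
      unfold Pre_find_common_notes_py at hpre
      simp only [List.all_cons, Bool.and_eq_true, List.all_eq_true, decide_eq_true_eq] at hpre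
      show rest.foldl pvStepA first = _
      exact pv_main rest first hpre.1
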